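-- pv_equiv track=rewrite | github.com/angbuilgu/programmers | 모의고사.py | solution
-- ===== SOURCE A (Python) =====
-- def solution(answers):
--     answer = []
--     ansA = 1
--     ansB = 2
--     ansC = 3
--     flag = 0
--     scoreA = 0
--     scoreB = 0
--     scoreC = 0
--     B = {}
--     B[1] = 1
--     B[3] = 3
--     B[5] = 4
--     B[7] = 5
--     C = {}
--     C[0] = 3
--     C[1] = 3
--     C[2] = 1
--     C[3] = 1
--     C[4] = 2
--     C[5] = 2
--     C[6] = 4
--     C[7] = 4
--     C[8] = 5
--     C[9] = 5
--     for i in answers: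
--         flag += 1
--         if i == ansA:
--             scoreA += 1
--         if i == ansB:
--             scoreB += 1
--         if i == ansC:
--             scoreC += 1
--         if ansA == 5:
--             ansA = 1
--         else:
--             ansA += 1
--         if flag % 2 == 0:
--             ansB = 2
--         else:
--             ansB = B[flag % 8]
--         ansC = C[flag % 10]
--     if scoreA >= scoreB and scoreA >= scoreC:
--         answer.append(1)
--     if scoreB >= scoreA and scoreB >= scoreC:
--         answer.append(2)
--     if scoreC >= scoreA and scoreC >= scoreB:
--         answer.append(3)
--
--     return answer
-- ===== SOURCE B (Python) =====
-- def solution(answers):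
--     patterns = [[1, 2, 3, 4, 5], [2, 1, 2, 3, 2, 4, 2, 5], [3, 3, 1, 1, 2, 2, 4, 4, 5, 5]]
--     cnt = {}
--     for i, x in enumerate(answers):
--         key = (i % 40, x)
--         cnt[key] = cnt.get(key, 0) + 1
--     scores = [sum(cnt.get((r, p[r % len(p)]), 0) for r in range(40)) for p in patterns]
--     m = max(scores)
--     return [i + 1 for i, s in enumerate(scores) if s == m]
-- ===== Notes on version B (the rewrite author's own statement) =====
-- stated objective: alternative
-- what changed: Replaces A's per-element state machine (mutating next-expected answers with cyclic counters and two lookup dicts, comparing each element against three running values) with a histogram: one pass builds a Counter keyed by (index mod 40, answer), then each score is a fixed 40-term lookup sum over that counter against the pattern value at each residue, and the winners are picked by comparing to max(scores).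
import Mathlib
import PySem

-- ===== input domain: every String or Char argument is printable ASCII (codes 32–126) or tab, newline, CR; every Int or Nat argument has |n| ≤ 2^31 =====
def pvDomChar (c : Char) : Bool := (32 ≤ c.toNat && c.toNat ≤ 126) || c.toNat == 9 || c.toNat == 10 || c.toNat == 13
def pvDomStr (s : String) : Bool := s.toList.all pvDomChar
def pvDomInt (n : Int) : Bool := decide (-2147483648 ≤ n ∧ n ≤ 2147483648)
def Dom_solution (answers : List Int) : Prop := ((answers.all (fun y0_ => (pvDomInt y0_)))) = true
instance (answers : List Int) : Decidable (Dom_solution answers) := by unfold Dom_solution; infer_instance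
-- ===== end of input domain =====

-- B replaces A's per-element next-answer state machine with a histogram keyed by (index mod 40, answer)
-- plus fixed 40-term lookup sums per pattern and a max-based selection: a different algorithm, same O(n).


-- ===== PORT A =====
-- the dict B = {1:1, 3:3, 5:4, 7:5} built by successive insertions, as in A
def solutionDictB : PySem.Dict Int Int :=
  (((PySem.Dict.empty.insert 1 1).insert 3 3).insert 5 4).insert 7 5

-- the dict C = {0:3, 1:3, 2:1, 3:1, 4:2, 5:2, 6:4, 7:4, 8:5, 9:5} built by successive insertions
def solutionDictC : PySem.Dict Int Int :=
  (((((((((PySem.Dict.empty.insert 0 3).insert 1 3).insert 2 1).insert 3 1).insert 4 2).insert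
    5 2).insert 6 4).insert 7 4).insert 8 5).insert 9 5

-- A's for-loop over answers with its full mutable state (ansA ansB ansC flag scoreA scoreB scoreC).
-- B[flag % 8] / C[flag % 10] use getD 0: exact, since every key reached (odd flag % 8; flag % 10)
-- is present in the dict, so Python's [] never raises there.
def solutionLoop : List Int → Int → Int → Int → Int → Int → Int → Int → Int × Int × Int
  | [], _, _, _, _, sA, sB, sC => (sA, sB, sC)
  | i :: t, ansA, ansB, ansC, flag, sA, sB, sC =>
    let flag' := flag + 1
    let sA' := if i = ansA then sA + 1 else sA
    let sB' := if i = ansB then sB + 1 else sB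
    let sC' := if i = ansC then sC + 1 else sC
    let ansA' := if ansA = 5 then 1 else ansA + 1
    let ansB' := if PySem.Int.mod flag' 2 = 0 then 2 else solutionDictB.getD (PySem.Int.mod flag' 8) 0
    let ansC' := solutionDictC.getD (PySem.Int.mod flag' 10) 0
    solutionLoop t ansA' ansB' ansC' flag' sA' sB' sC'

def solution (answers : List Int) : List Int :=
  let s := solutionLoop answers 1 2 3 0 0 0 0
  let answer : List Int := []
  let answer := if s.1 ≥ s.2.1 ∧ s.1 ≥ s.2.2 then answer ++ [1] else answer
  let answer := if s.2.1 ≥ s.1 ∧ s.2.1 ≥ s.2.2 then answer ++ [2] else answer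
  let answer := if s.2.2 ≥ s.1 ∧ s.2.2 ≥ s.2.1 then answer ++ [3] else answer
  answer

-- ===== PORT B =====
-- Source B's patterns list
def solutionPatterns : List (List Int) := [[1, 2, 3, 4, 5], [2, 1, 2, 3, 2, 4, 2, 5], [3, 3, 1, 1, 2, 2, 4, 4, 5, 5]]

-- Source B's first loop: cnt[key] = cnt.get(key, 0) + 1 over enumerate(answers), key = (i % 40, x)
def solutionCnt (answers : List Int) : PySem.Dict (Int × Int) Int :=
  (PySem.List.enumerate answers).foldl
    (fun d p => d.insert (PySem.Int.mod p.1 40, p.2) (d.getD (PySem.Int.mod p.1 40, p.2) 0 + 1))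
    PySem.Dict.empty

-- sum(cnt.get((r, p[r % len(p)]), 0) for r in range(40)); p[r % len(p)] via pyGetD is exact
-- (the index r % len(p) is always in range for the nonempty patterns used)
def solutionScore (cnt : PySem.Dict (Int × Int) Int) (p : List Int) : Int :=
  (PySem.List.pyRange 0 40 1).foldl
    (fun acc r => acc + cnt.getD (r, PySem.List.pyGetD p (PySem.Int.mod r (PySem.List.len p)) 0) 0) 0

def solution_alt (answers : List Int) : List Int :=
  let cnt := solutionCnt answers
  let scores := solutionPatterns.map (fun p => solutionScore cnt p)
  -- max(scores): scores has exactly 3 elements, so Python's max never raises; getD 0 is exact here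
  let m := (PySem.List.max? scores (fun y => y)).getD 0
  ((PySem.List.enumerate scores).filter (fun p => p.2 == m)).map (fun p => p.1 + 1)

-- ===== PRECONDITION & SPEC =====
def Spec_solution (answers : List Int) (out : List Int) : Prop := out = solution_alt answers
instance (answers : List Int) (out : List Int) : Decidable (Spec_solution answers out) := by unfold Spec_solution; infer_instance

-- ===== CLAIM (what is proved, stated in full; the proofs are below) =====
def Claim_equal_solution : Prop := ∀ (answers : List Int), Dom_solution answers → Spec_solution answers (solution answers)

-- ===== LEMMAS AND PROOFS =====

-- match count of answers against the cyclic pattern p, starting at position k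
def cmv (p : List Int) (k : Nat) : Int := p.getD (k % p.length) 0

def cm (p : List Int) : List Int → Nat → Int
  | [], _ => 0
  | x :: t, k => (if x = cmv p k then 1 else 0) + cm p t (k + 1)

def pa5 : List Int := [1, 2, 3, 4, 5]
def pb8 : List Int := [2, 1, 2, 3, 2, 4, 2, 5]
def pc10 : List Int := [3, 3, 1, 1, 2, 2, 4, 4, 5, 5]

-- ---- A side: the running next-answer values are the cyclic pattern values ----
lemma paVal_step (k : Nat) : (if cmv pa5 k = 5 then (1 : Int) else cmv pa5 k + 1) = cmv pa5 (k + 1) := by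
  unfold cmv pa5
  have h : k % 5 < 5 := Nat.mod_lt _ (by omega)
  have h' : (k + 1) % 5 = (k % 5 + 1) % 5 := by omega
  rw [show ([1,2,3,4,5] : List Int).length = 5 from rfl, h']
  interval_cases h5 : k % 5 <;> decide

lemma pbVal_step (k : Nat) :
    (if PySem.Int.mod (((k + 1 : Nat)) : Int) 2 = 0 then (2 : Int)
      else solutionDictB.getD (PySem.Int.mod (((k + 1 : Nat)) : Int) 8) 0) = cmv pb8 (k + 1) := by
  unfold cmv pb8
  have h2 : PySem.Int.mod (((k + 1 : Nat)) : Int) 2 = (((k + 1) % 2 : Nat) : Int) := by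
    exact_mod_cast PySem.Int.mod_natCast (k + 1) 2
  have h8 : PySem.Int.mod (((k + 1 : Nat)) : Int) 8 = (((k + 1) % 8 : Nat) : Int) := by
    exact_mod_cast PySem.Int.mod_natCast (k + 1) 8
  rw [h2, h8, show ([2,1,2,3,2,4,2,5] : List Int).length = 8 from rfl]
  have h : (k + 1) % 8 < 8 := Nat.mod_lt _ (by omega)
  have h' : (k + 1) % 2 = ((k + 1) % 8) % 2 := by omega
  rw [h']
  interval_cases h8' : (k + 1) % 8 <;> decide

lemma pcVal_step (k : Nat) :
    solutionDictC.getD (PySem.Int.mod (((k + 1 : Nat)) : Int) 10) 0 = cmv pc10 (k + 1) := by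
  unfold cmv pc10
  have h10 : PySem.Int.mod (((k + 1 : Nat)) : Int) 10 = (((k + 1) % 10 : Nat) : Int) := by
    exact_mod_cast PySem.Int.mod_natCast (k + 1) 10
  rw [h10, show ([3,3,1,1,2,2,4,4,5,5] : List Int).length = 10 from rfl]
  have h : (k + 1) % 10 < 10 := Nat.mod_lt _ (by omega)
  interval_cases h10' : (k + 1) % 10 <;> decide

lemma loopA_eq (xs : List Int) : ∀ (k : Nat) (sa sb sc : Int),
    solutionLoop xs (cmv pa5 k) (cmv pb8 k) (cmv pc10 k) (k : Int) sa sb sc =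
      (sa + cm pa5 xs k, sb + cm pb8 xs k, sc + cm pc10 xs k) := by
  induction xs with
  | nil => intro k sa sb sc; simp [solutionLoop, cm]
  | cons x t ih =>
    intro k sa sb sc
    rw [show solutionLoop (x :: t) (cmv pa5 k) (cmv pb8 k) (cmv pc10 k) (k : Int) sa sb sc =
      solutionLoop t
        (if cmv pa5 k = 5 then 1 else cmv pa5 k + 1)
        (if PySem.Int.mod ((k : Int) + 1) 2 = 0 then 2 else solutionDictB.getD (PySem.Int.mod ((k : Int) + 1) 8) 0)
        (solutionDictC.getD (PySem.Int.mod ((k : Int) + 1) 10) 0)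
        ((k : Int) + 1)
        (if x = cmv pa5 k then sa + 1 else sa)
        (if x = cmv pb8 k then sb + 1 else sb)
        (if x = cmv pc10 k then sc + 1 else sc) from rfl]
    have hc : ((k : Int) + 1) = ((k + 1 : Nat) : Int) := by push_cast; ring
    simp only [hc]
    rw [paVal_step k, pbVal_step k, pcVal_step k]
    rw [ih (k + 1)]
    simp only [cm, Prod.mk.injEq]
    refine ⟨?_, ?_, ?_⟩ <;> split_ifs <;> ring

-- ---- B side: the counter lookup sums are the same match counts ----

-- keys inserted by Source B's counter loop, starting at enumerate index k
def keyList (k : Nat) : List Int → List (Int × Int)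
  | [] => []
  | x :: t => (((k % 40 : Nat) : Int), x) :: keyList (k + 1) t

lemma solutionCnt_getD (xs : List Int) : ∀ (k : Nat) (d : PySem.Dict (Int × Int) Int) (key : Int × Int),
    ((PySem.List.enumerate xs (k : Int)).foldl
      (fun d p => d.insert (PySem.Int.mod p.1 40, p.2) (d.getD (PySem.Int.mod p.1 40, p.2) 0 + 1)) d).getD key 0
    = d.getD key 0 + ((keyList k xs).count key : Int) := by
  induction xs with
  | nil => intro k d key; simp [PySem.List.enumerate_nil, keyList]
  | cons x t ih =>
    intro k d key
    rw [PySem.List.enumerate_cons]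
    simp only [List.foldl_cons]
    have hm : PySem.Int.mod ((k : Int)) 40 = ((k % 40 : Nat) : Int) := by
      exact_mod_cast PySem.Int.mod_natCast k 40
    have hc : ((k : Int) + 1) = ((k + 1 : Nat) : Int) := by push_cast; ring
    rw [hm, hc, ih (k + 1), PySem.Dict.getD_insert]
    rw [show keyList k (x :: t) = ((((k % 40 : Nat) : Int)), x) :: keyList (k + 1) t from rfl,
      List.count_cons]
    by_cases h : key = ((((k % 40 : Nat) : Int)), x)
    · rw [if_pos h, h]
      simp only [BEq.rfl, if_pos]
      push_cast; ring
    · rw [if_neg h]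
      have hb : (((((k % 40 : Nat) : Int)), x) == key) = false := by
        rw [beq_eq_false_iff_ne]; exact fun hh => h hh.symm
      rw [hb]; push_cast; ring

-- sum over range n of a one-point indicator
lemma sum_ite_range (j n : Nat) (h : j < n) :
    ((List.range n).map (fun r => if r = j then (1 : Int) else 0)).sum = 1 := by
  induction n with
  | zero => omega
  | succ n ih =>
    rw [List.range_succ, List.map_append, List.sum_append]
    by_cases hj : j = n
    · subst hj
      have he : ((List.range j).map (fun r => if r = j then (1 : Int) else 0))
          = (List.range j).map (fun _ => (0 : Int)) := by
        apply List.map_congr_left; intro r hr; simp at hr; simp; omega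
      simp [he]
    · rw [ih (by omega)]; simp; omega

-- the 0/1 indicator summed over the 40 residues
lemma indicator_sum (p : List Int) (hm : p.length ∣ 40) (x : Int) (k : Nat) :
    ((List.range 40).map (fun r =>
        if ((((((k % 40 : Nat) : Int)), x)) == ((((r : Nat) : Int)), cmv p r)) then (1 : Int) else 0)).sum
      = if x = cmv p k then 1 else 0 := by
  have hcm : cmv p (k % 40) = cmv p k := by
    unfold cmv; rw [Nat.mod_mod_of_dvd k hm]
  by_cases hx : x = cmv p k
  · rw [if_pos hx]
    rw [show ((List.range 40).map (fun r =>
          if ((((((k % 40 : Nat) : Int)), x)) == ((((r : Nat) : Int)), cmv p r)) then (1 : Int) else 0))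
        = (List.range 40).map (fun r => if r = k % 40 then (1 : Int) else 0) from ?_]
    · exact sum_ite_range (k % 40) 40 (Nat.mod_lt _ (by omega))
    · apply List.map_congr_left; intro r _
      simp only [beq_iff_eq, Prod.mk.injEq]
      by_cases hr' : r = k % 40
      · subst hr'; simp [hx, hcm]
      · rw [if_neg, if_neg hr']
        rintro ⟨h1, _⟩; exact hr' (by exact_mod_cast h1.symm)
  · rw [if_neg hx]
    have he : ((List.range 40).map (fun r =>
          if ((((((k % 40 : Nat) : Int)), x)) == ((((r : Nat) : Int)), cmv p r)) then (1 : Int) else 0))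
        = (List.range 40).map (fun _ => (0 : Int)) := by
      apply List.map_congr_left; intro r _
      simp only [beq_iff_eq, Prod.mk.injEq]
      rw [if_neg]
      rintro ⟨h1, h2⟩
      have hr : r = k % 40 := by exact_mod_cast h1.symm
      subst hr; exact hx (h2.trans hcm)
    rw [he]; simp

lemma sum_count_eq_cm (p : List Int) (hm : p.length ∣ 40) (xs : List Int) : ∀ (k : Nat),
    ((List.range 40).map (fun r => (((keyList k xs).count ((((r : Nat) : Int)), cmv p r) : Nat) : Int))).sum
      = cm p xs k := by
  induction xs with
  | nil => intro k; simp [keyList, cm]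
  | cons x t ih =>
    intro k
    have hstep : ((List.range 40).map (fun r => (((keyList k (x :: t)).count ((((r : Nat) : Int)), cmv p r) : Nat) : Int)))
        = (List.range 40).map (fun r => (((keyList (k + 1) t).count ((((r : Nat) : Int)), cmv p r) : Nat) : Int)
            + (if ((((((k % 40 : Nat) : Int)), x)) == ((((r : Nat) : Int)), cmv p r)) then (1 : Int) else 0)) := by
      apply List.map_congr_left; intro r _
      rw [show keyList k (x :: t) = ((((k % 40 : Nat) : Int)), x) :: keyList (k + 1) t from rfl,
        List.count_cons]
      push_cast
      split_ifs <;> simp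
    rw [hstep, PySem.List.sum_map_add_int, ih, indicator_sum p hm x k]
    simp only [cm]; ring

lemma score_eq_cm (p : List Int) (hm : p.length ∣ 40) (xs : List Int) :
    solutionScore (solutionCnt xs) p = cm p xs 0 := by
  unfold solutionScore
  rw [PySem.List.foldl_add]
  rw [show PySem.List.pyRange 0 40 1 = (List.range 40).map (fun k : Nat => ((k : Nat) : Int)) by
    rw [PySem.List.pyRange_one]; simp]
  rw [List.map_map]
  have hterm : ∀ r ∈ List.range 40,
      ((fun r => (solutionCnt xs).getD (r, PySem.List.pyGetD p (PySem.Int.mod r (PySem.List.len p)) 0) 0) ∘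
        (fun k : Nat => ((k : Nat) : Int))) r
      = (((keyList 0 xs).count ((((r : Nat) : Int)), cmv p r) : Nat) : Int) := by
    intro r _
    show (solutionCnt xs).getD (((r : Nat) : Int), PySem.List.pyGetD p (PySem.Int.mod ((r : Nat) : Int) (PySem.List.len p)) 0) 0 = _
    have h1 : PySem.Int.mod ((r : Nat) : Int) (PySem.List.len p) = ((r % p.length : Nat) : Int) := by
      rw [PySem.List.len_eq]; exact_mod_cast PySem.Int.mod_natCast r p.length
    rw [h1, PySem.List.pyGetD_natCast]
    have h2 : (solutionCnt xs).getD (((r : Nat) : Int), p.getD (r % p.length) 0) 0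
        = PySem.Dict.getD PySem.Dict.empty (((r : Nat) : Int), p.getD (r % p.length) 0) 0
          + (((keyList 0 xs).count ((((r : Nat) : Int)), p.getD (r % p.length) 0) : Nat) : Int) := by
      have := solutionCnt_getD xs 0 PySem.Dict.empty (((r : Nat) : Int), p.getD (r % p.length) 0)
      simpa [solutionCnt] using this
    rw [h2, PySem.Dict.getD_empty]
    simp [cmv]
  rw [List.map_congr_left hterm, sum_count_eq_cm p hm xs 0]
  ring

-- ---- final selection block ----
lemma final_eq (a b c : Int) :
    (let answer : List Int := []
     let answer := if a ≥ b ∧ a ≥ c then answer ++ [1] else answer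
     let answer := if b ≥ a ∧ b ≥ c then answer ++ [2] else answer
     let answer := if c ≥ a ∧ c ≥ b then answer ++ [3] else answer
     answer)
    = (let m := (PySem.List.max? [a, b, c] (fun y => y)).getD 0
       ((PySem.List.enumerate [a, b, c]).filter (fun p => p.2 == m)).map (fun p => p.1 + 1)) := by
  have hmax : (PySem.List.max? [a, b, c] (fun y => y)).getD 0 = max (max a b) c := by
    rw [PySem.List.max?_id_cons]; rfl
  simp only [hmax, PySem.List.enumerate_cons, PySem.List.enumerate_nil, List.filter_cons,
    List.filter_nil, beq_iff_eq]
  split_ifs <;> first | (exfalso; omega) | norm_num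

-- ===== VERDICT (by name: the statement is the Claim_ definition above) =====
theorem solution_spec : Claim_equal_solution := by
  intro answers _
  unfold Spec_solution solution solution_alt
  have hA := loopA_eq answers 0 0 0 0
  have h0 : cmv pa5 0 = 1 ∧ cmv pb8 0 = 2 ∧ cmv pc10 0 = 3 := by decide
  rw [h0.1, h0.2.1, h0.2.2] at hA
  simp only [Nat.cast_zero] at hA
  rw [hA]
  have hsc : solutionPatterns.map (fun p => solutionScore (solutionCnt answers) p)
      = [cm pa5 answers 0, cm pb8 answers 0, cm pc10 answers 0] := by
    simp only [solutionPatterns, List.map]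
    rw [show ([1, 2, 3, 4, 5] : List Int) = pa5 from rfl,
      show ([2, 1, 2, 3, 2, 4, 2, 5] : List Int) = pb8 from rfl,
      show ([3, 3, 1, 1, 2, 2, 4, 4, 5, 5] : List Int) = pc10 from rfl,
      score_eq_cm pa5 (by decide), score_eq_cm pb8 (by decide), score_eq_cm pc10 (by decide)]
  simp only [hsc, zero_add]
  exact final_eq _ _ _
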